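-- pv_equiv track=rewrite | github.com/khadija2027/l | deformation_width_impact_on_flow.py | defo
-- ===== SOURCE A (Python) =====
-- def defo(Xmin, Xmax, Ymax):
--         L = []
--         x = Xmin
--         y = 0
--         while Xmin <= x <= Xmax and y <= Ymax:
--             L.append((x, y))
--             if x == Xmax:
--                 x = Xmin
--                 y += 1
--                 continue
--             x += 1
--         return L
-- ===== SOURCE B (Python) =====
-- def defo(Xmin, Xmax, Ymax):
--     if Xmin > Xmax:
--         return []
--     L = []
--     for y in range(0, Ymax + 1):
--         for x in range(Xmin, Xmax + 1):
--             L.append((x, y))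
--     return L
-- ===== Notes on version B (the rewrite author's own statement) =====
-- stated objective: idiomatic
-- what changed: Replaces the single while-loop driving a manual x/y state machine (with reset-and-continue on row end) by two plain nested for-loops over ranges.
import Mathlib
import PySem

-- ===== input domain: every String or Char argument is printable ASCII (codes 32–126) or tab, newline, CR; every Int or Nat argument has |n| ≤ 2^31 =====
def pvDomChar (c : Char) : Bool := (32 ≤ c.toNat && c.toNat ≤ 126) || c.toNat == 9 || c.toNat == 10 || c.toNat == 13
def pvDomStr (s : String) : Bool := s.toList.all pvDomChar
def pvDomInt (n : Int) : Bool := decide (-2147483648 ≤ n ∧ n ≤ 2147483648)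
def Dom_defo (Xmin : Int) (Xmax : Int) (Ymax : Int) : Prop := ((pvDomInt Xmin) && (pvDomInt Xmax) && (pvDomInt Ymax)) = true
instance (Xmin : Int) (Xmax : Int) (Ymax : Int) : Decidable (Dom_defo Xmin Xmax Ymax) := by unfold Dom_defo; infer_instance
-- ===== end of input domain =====

-- B replaces A's single while-loop x/y state machine by two idiomatic nested for-loops (same cost).

-- ===== PORT A =====
-- literal port of A's while loop: state (x, y, L), same branch order
def defoLoop (Xmin Xmax Ymax : Int) (x y : Int) (L : List (Int × Int)) : List (Int × Int) :=
  if _h : Xmin ≤ x ∧ x ≤ Xmax ∧ y ≤ Ymax then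
    if _hx : x = Xmax then
      defoLoop Xmin Xmax Ymax Xmin (y + 1) (L ++ [(x, y)])
    else
      defoLoop Xmin Xmax Ymax (x + 1) y (L ++ [(x, y)])
  else L
termination_by ((Ymax + 1 - y).toNat, (Xmax - x).toNat)
decreasing_by
  · apply Prod.Lex.left; omega
  · apply Prod.Lex.right; omega

def defo (Xmin : Int) (Xmax : Int) (Ymax : Int) : List (Int × Int) :=
  defoLoop Xmin Xmax Ymax Xmin 0 []

-- ===== PORT B =====
def defo_alt (Xmin : Int) (Xmax : Int) (Ymax : Int) : List (Int × Int) :=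
  if Xmin > Xmax then []
  else
  (PySem.List.pyRange 0 (Ymax + 1) 1).foldl
    (fun L y =>
      (PySem.List.pyRange Xmin (Xmax + 1) 1).foldl
        (fun L x => L ++ [(x, y)]) L) []

-- ===== PRECONDITION & SPEC =====
def Spec_defo (Xmin : Int) (Xmax : Int) (Ymax : Int) (out : List (Int × Int)) : Prop := out = defo_alt Xmin Xmax Ymax
instance (Xmin : Int) (Xmax : Int) (Ymax : Int) (out : List (Int × Int)) : Decidable (Spec_defo Xmin Xmax Ymax out) := by unfold Spec_defo; infer_instance

-- ===== CLAIM (what is proved, stated in full; the proofs are below) =====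
def Claim_equal_defo : Prop := ∀ (Xmin : Int) (Xmax : Int) (Ymax : Int), Dom_defo Xmin Xmax Ymax → Spec_defo Xmin Xmax Ymax (defo Xmin Xmax Ymax)

-- ===== LEMMAS AND PROOFS =====

-- one row of A's loop: from (x, y) it emits x..Xmax paired with y, then restarts at (Xmin, y+1)
theorem defoLoop_row (Xmin Xmax Ymax : Int) (y : Int) (hy : y ≤ Ymax) :
    ∀ (x : Int) (L : List (Int × Int)), Xmin ≤ x → x ≤ Xmax →
      defoLoop Xmin Xmax Ymax x y L =
      defoLoop Xmin Xmax Ymax Xmin (y + 1)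
        (L ++ (PySem.List.pyRange x (Xmax + 1) 1).map (fun t => (t, y))) := by
  intro x
  induction hk : (Xmax - x).toNat generalizing x with
  | zero =>
    intro L h1 h2
    have hx : x = Xmax := by omega
    subst hx
    rw [defoLoop, dif_pos ⟨h1, le_rfl, hy⟩]
    rw [PySem.List.pyRange_one_singleton]
    simp
  | succ n ih =>
    intro L h1 h2
    have hx : x < Xmax := by omega
    rw [defoLoop, dif_pos ⟨h1, h2, hy⟩, dif_neg (by omega)]
    rw [ih (x + 1) (by omega) (L ++ [(x, y)]) (by omega) (by omega)]
    rw [PySem.List.pyRange_one_cons (a := x) (b := Xmax + 1) (by omega)]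
    simp

-- A's loop from the start of row y produces all remaining rows
theorem defoLoop_rows (Xmin Xmax Ymax : Int) :
    ∀ (y : Int) (L : List (Int × Int)),
      defoLoop Xmin Xmax Ymax Xmin y L =
      L ++ (PySem.List.pyRange y (Ymax + 1) 1).flatMap
        (fun r => (PySem.List.pyRange Xmin (Xmax + 1) 1).map (fun t => (t, r))) := by
  intro y
  induction hk : (Ymax + 1 - y).toNat generalizing y with
  | zero =>
    intro L
    rw [defoLoop, dif_neg (by omega),
      PySem.List.pyRange_one_eq_nil (a := y) (b := Ymax + 1) (by omega)]
    simp
  | succ n ih =>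
    intro L
    have hy : y ≤ Ymax := by omega
    rw [PySem.List.pyRange_one_cons (a := y) (b := Ymax + 1) (by omega)]
    by_cases hx : Xmin ≤ Xmax
    · rw [defoLoop_row Xmin Xmax Ymax y hy Xmin L le_rfl hx]
      rw [ih (y + 1) (by omega)]
      simp
    · rw [defoLoop, dif_neg (by omega)]
      have h0 : PySem.List.pyRange Xmin (Xmax + 1) 1 = [] :=
        PySem.List.pyRange_one_eq_nil (by omega)
      simp [h0]

-- ===== VERDICT (by name: the statement is the Claim_ definition above) =====
theorem defo_spec : Claim_equal_defo := by
  intro Xmin Xmax Ymax _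
  unfold Spec_defo defo defo_alt
  rw [defoLoop_rows]
  by_cases hx : Xmin > Xmax
  · rw [if_pos hx]
    have h0 : PySem.List.pyRange Xmin (Xmax + 1) 1 = [] :=
      PySem.List.pyRange_one_eq_nil (a := Xmin) (b := Xmax + 1) (by omega)
    simp [h0]
  · rw [if_neg hx]
    simp only [PySem.List.foldl_append_singleton_eq_map]
    rw [PySem.List.foldl_append_eq_flatMap]
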